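-- pv_equiv track=rewrite | github.com/StudyAlgorithmTeam/Season3 | 3주차 DP/김동주/extra/boj_9626.py | solve
-- ===== SOURCE A (Python) =====
-- def solve(M: int, N: int, U: int, L: int, R: int, D: int, puzzle: list) -> int:
--     W = L+R+N
--     H = U+D+M
--     grid = [['.' if (y+x) % 2 else '#' for x in range(W)] for y in range(H)]
--     for y in range(M):
--         for x in range(N):
--             grid[y+U][x+L] = puzzle[y][x]
--     return '\n'.join(''.join(row) for row in grid)
-- ===== SOURCE B (Python) =====
-- def solve(M: int, N: int, U: int, L: int, R: int, D: int, puzzle: list) -> int: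
--     W = L + R + N
--     H = U + D + M
--     return '\n'.join(
--         ''.join(
--             puzzle[y - U][x - L] if (U <= y < U + M and L <= x < L + N)
--             else ('.' if (y + x) % 2 else '#')
--             for x in range(W)
--         )
--         for y in range(H)
--     )
-- ===== Notes on version B (the rewrite author's own statement) =====
-- stated objective: simpler
-- what changed: B drops A's two-phase build-then-overwrite (materialise a mutable H x W checkerboard grid, then a second nested loop overwriting the puzzle window) and computes each cell exactly once in a single pass, choosing puzzle[y-U][x-L] inside the window and the parity character elsewhere, building each row string directly with no intermediate 2D list.
-- outside the precondition, e.g. on solve(1, 1, -1, 0, 0, 2, [['X']]): A returns '#\nX', B returns '#\n.'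
import Mathlib
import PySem

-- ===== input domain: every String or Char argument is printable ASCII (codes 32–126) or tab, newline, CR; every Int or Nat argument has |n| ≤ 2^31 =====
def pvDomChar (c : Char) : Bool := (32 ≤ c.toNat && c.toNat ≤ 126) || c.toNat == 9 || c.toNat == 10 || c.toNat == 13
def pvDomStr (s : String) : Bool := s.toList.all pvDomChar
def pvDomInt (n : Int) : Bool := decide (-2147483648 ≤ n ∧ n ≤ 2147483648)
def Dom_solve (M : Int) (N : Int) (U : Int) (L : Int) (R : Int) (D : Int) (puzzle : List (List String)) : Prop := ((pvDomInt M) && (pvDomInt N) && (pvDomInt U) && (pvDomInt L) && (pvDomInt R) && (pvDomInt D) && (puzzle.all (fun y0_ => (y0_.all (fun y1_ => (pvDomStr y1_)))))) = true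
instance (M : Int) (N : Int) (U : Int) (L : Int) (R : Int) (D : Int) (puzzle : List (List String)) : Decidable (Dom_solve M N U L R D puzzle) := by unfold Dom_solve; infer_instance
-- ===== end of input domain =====

-- B drops A's build-checkerboard-then-overwrite approach and computes each cell once in a
-- single pass (puzzle cell inside the window, parity cell elsewhere), building each row
-- string directly with no intermediate mutable 2D grid; objective: simpler.

-- ===== PORT A =====
def solve (M : Int) (N : Int) (U : Int) (L : Int) (R : Int) (D : Int) (puzzle : List (List String)) : String :=
  let W := L + R + N
  let H := U + D + M
  let grid : List (List String) :=
    (PySem.List.pyRange 0 H 1).map (fun y =>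
      (PySem.List.pyRange 0 W 1).map (fun x =>
        if PySem.Int.mod (y + x) 2 ≠ 0 then "." else "#"))
  let grid :=
    (PySem.List.pyRange 0 M 1).foldl (fun g y =>
      (PySem.List.pyRange 0 N 1).foldl (fun g x =>
        PySem.List.pySetD g (y + U)
          (PySem.List.pySetD (PySem.List.pyGetD g (y + U) []) (x + L)
            (PySem.List.pyGetD (PySem.List.pyGetD puzzle y []) x ""))) g) grid
  PySem.Str.join "\n" (grid.map (fun row => PySem.Str.join "" row))

-- ===== PORT B =====
def solve_alt (M : Int) (N : Int) (U : Int) (L : Int) (R : Int) (D : Int) (puzzle : List (List String)) : String :=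
  let W := L + R + N
  let H := U + D + M
  PySem.Str.join "\n" ((PySem.List.pyRange 0 H 1).map (fun y =>
    PySem.Str.join "" ((PySem.List.pyRange 0 W 1).map (fun x =>
      if U ≤ y ∧ y < U + M ∧ L ≤ x ∧ x < L + N then
        PySem.List.pyGetD (PySem.List.pyGetD puzzle (y - U) []) (x - L) ""
      else if PySem.Int.mod (y + x) 2 ≠ 0 then "." else "#"))))

-- ===== PRECONDITION & SPEC =====
-- Pre_ admits every input with an empty puzzle window (M ≤ 0 or N ≤ 0: A touches nothing and
-- returns the bare checkerboard) and, for a real window, the problem's natural domain: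
-- nonnegative margins and a puzzle holding at least M rows of at least N cells. Outside it A
-- raises IndexError (puzzle too small, or a write past an edge when R < 0 or D < 0) or places
-- puzzle cells by negative-index wraparound (U < 0 or L < 0), an artefact of A's mutation step.
def Pre_solve (M : Int) (N : Int) (U : Int) (L : Int) (R : Int) (D : Int) (puzzle : List (List String)) : Prop :=
  (M ≤ 0 ∨ N ≤ 0) ∨
  (0 ≤ U ∧ 0 ≤ L ∧ 0 ≤ R ∧ 0 ≤ D ∧
   M.toNat ≤ puzzle.length ∧ ∀ row ∈ puzzle.take M.toNat, N.toNat ≤ row.length)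
instance (M : Int) (N : Int) (U : Int) (L : Int) (R : Int) (D : Int) (puzzle : List (List String)) : Decidable (Pre_solve M N U L R D puzzle) := by unfold Pre_solve; infer_instance

def pvWitness_solve : Int × Int × Int × Int × Int × Int × List (List String) := (1, 2, 1, 1, 1, 1, [["a", "b"]])

def Spec_solve (M : Int) (N : Int) (U : Int) (L : Int) (R : Int) (D : Int) (puzzle : List (List String)) (out : String) : Prop := out = solve_alt M N U L R D puzzle
instance (M : Int) (N : Int) (U : Int) (L : Int) (R : Int) (D : Int) (puzzle : List (List String)) (out : String) : Decidable (Spec_solve M N U L R D puzzle out) := by unfold Spec_solve; infer_instance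

-- ===== CLAIM (what is proved, stated in full; the proofs are below) =====
def Claim_equal_solve : Prop := ∀ (M : Int) (N : Int) (U : Int) (L : Int) (R : Int) (D : Int) (puzzle : List (List String)), Dom_solve M N U L R D puzzle → Pre_solve M N U L R D puzzle → Spec_solve M N U L R D puzzle (solve M N U L R D puzzle)

-- ===== LEMMAS AND PROOFS =====

-- setting an index to the value already there (or out of range) is a no-op
lemma set_getD_self {α : Type} (l : List α) (i : Nat) (d : α) : l.set i (l.getD i d) = l := by
  by_cases h : i < l.length
  · rw [List.getD_eq_getElem l d h]; exact List.set_getElem_self h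
  · exact List.set_eq_of_length_le (le_of_not_gt h)

-- A's inner loop: every write lands in row i, so the whole loop is one `set` of row i
lemma inner_fold_set {β : Type} (d : List β) (g : List (List β)) (i n off : Nat) (f : Nat → β) :
    (List.range n).foldl (fun g x => g.set i ((g.getD i d).set (x + off) (f x))) g
      = g.set i ((List.range n).foldl (fun r x => r.set (x + off) (f x)) (g.getD i d)) := by
  induction n with
  | zero =>
    simp only [List.range_zero, List.foldl_nil]
    exact (set_getD_self g i d).symm
  | succ n ih =>
    rw [List.range_succ, List.foldl_append, List.foldl_append, ih]
    simp only [List.foldl_cons, List.foldl_nil]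
    by_cases h : i < g.length
    · rw [List.getD_eq_getElem?_getD (l := g.set i _),
        List.getElem?_set_self (by simpa using h)]
      simp [List.set_set]
    · have hle := le_of_not_gt h
      simp only [List.set_eq_of_length_le hle]

lemma foldl_set_window_length {α : Type} (d : α) (g : List α) (off k : Nat) (f : Nat → α → α) :
    ((List.range k).foldl (fun g y => g.set (y + off) (f y (g.getD (y + off) d))) g).length
      = g.length := by
  induction k with
  | zero => rfl
  | succ k ih =>
    rw [List.range_succ, List.foldl_append]
    simp only [List.foldl_cons, List.foldl_nil, List.length_set]
    exact ih

-- writing f y (old row) at positions off, off+1, …, off+k-1: the result at j is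
-- f (j-off) applied to the ORIGINAL entry for j inside the window, unchanged elsewhere
lemma foldl_set_window {α : Type} (d : α) (g : List α) (off k : Nat) (f : Nat → α → α)
    (hk : off + k ≤ g.length) (j : Nat) :
    ((List.range k).foldl (fun g y => g.set (y + off) (f y (g.getD (y + off) d))) g)[j]? =
      if off ≤ j ∧ j < off + k then some (f (j - off) (g.getD j d)) else g[j]? := by
  revert hk j
  induction k with
  | zero => intro hk j; simp
  | succ k ih =>
    intro hk j
    have ih' := ih (by omega)
    rw [List.range_succ, List.foldl_append]
    simp only [List.foldl_cons, List.foldl_nil]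
    have hgd : ((List.range k).foldl
        (fun g y => g.set (y + off) (f y (g.getD (y + off) d))) g).getD (k + off) d
        = g.getD (k + off) d := by
      rw [List.getD_eq_getElem?_getD, List.getD_eq_getElem?_getD, ih' (k + off),
        if_neg (by omega)]
    rw [hgd, List.getElem?_set]
    by_cases hj : k + off = j
    · subst hj
      rw [if_pos rfl, if_pos (by rw [foldl_set_window_length]; omega),
        if_pos (by omega : off ≤ k + off ∧ k + off < off + (k + 1))]
      have hko : k + off - off = k := by omega
      rw [hko]
    · rw [if_neg hj, ih' j]
      split_ifs with h1 h2 h2 <;> first | rfl | omega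

-- same, for a write that does not read the old entry
lemma foldl_set_getElem? {α : Type} (d : α) (g : List α) (off k : Nat) (f : Nat → α)
    (hk : off + k ≤ g.length) (j : Nat) :
    ((List.range k).foldl (fun g y => g.set (y + off) (f y)) g)[j]? =
      if off ≤ j ∧ j < off + k then some (f (j - off)) else g[j]? := by
  simpa using foldl_set_window d g off k (fun y _ => f y) hk j

-- the characterisation of A's double overwrite loop (all indices already in Nat form)
lemma Agrid_getElem? (pz : Nat → Nat → String) (u l m n : Nat) (g0 : List (List String))
    (hm : u + m ≤ g0.length) (j : Nat) :
    ((List.range m).foldl (fun g y =>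
        (List.range n).foldl (fun g x =>
          g.set (y + u) ((g.getD (y + u) []).set (x + l) (pz y x))) g) g0)[j]?
      = if u ≤ j ∧ j < u + m then
          some ((List.range n).foldl (fun r x => r.set (x + l) (pz (j - u) x)) (g0.getD j []))
        else g0[j]? := by
  have hbody : (fun (g : List (List String)) (y : Nat) =>
      (List.range n).foldl (fun g x =>
        g.set (y + u) ((g.getD (y + u) []).set (x + l) (pz y x))) g)
      = fun g y => g.set (y + u)
          ((fun y r => (List.range n).foldl (fun r x => r.set (x + l) (pz y x)) r) y
            (g.getD (y + u) [])) := by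
    funext g y; exact inner_fold_set [] g (y + u) n l (pz y)
  rw [hbody]
  exact foldl_set_window [] g0 u m
    (fun y r => (List.range n).foldl (fun r x => r.set (x + l) (pz y x)) r) hm j

-- the empty-window case: A's overwrite loops run zero iterations, B's window test is vacuous
theorem solve_eq_alt_trivial (M N U L R D : Int) (puzzle : List (List String))
    (hMN : M ≤ 0 ∨ N ≤ 0) :
    solve M N U L R D puzzle = solve_alt M N U L R D puzzle := by
  simp only [solve, solve_alt]
  have hfold : (PySem.List.pyRange 0 M 1).foldl (fun g y =>
      (PySem.List.pyRange 0 N 1).foldl (fun g x =>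
        PySem.List.pySetD g (y + U)
          (PySem.List.pySetD (PySem.List.pyGetD g (y + U) []) (x + L)
            (PySem.List.pyGetD (PySem.List.pyGetD puzzle y []) x ""))) g)
      ((PySem.List.pyRange 0 (U + D + M) 1).map (fun y =>
        (PySem.List.pyRange 0 (L + R + N) 1).map (fun x =>
          if PySem.Int.mod (y + x) 2 ≠ 0 then "." else "#")))
      = (PySem.List.pyRange 0 (U + D + M) 1).map (fun y =>
        (PySem.List.pyRange 0 (L + R + N) 1).map (fun x =>
          if PySem.Int.mod (y + x) 2 ≠ 0 then "." else "#")) := by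
    rcases hMN with hM | hN
    · rw [show PySem.List.pyRange 0 M 1 = [] from PySem.List.pyRange_one_eq_nil (by omega),
        List.foldl_nil]
    · have hbody : ∀ (g : List (List String)) (y : Int),
          (PySem.List.pyRange 0 N 1).foldl (fun g x =>
            PySem.List.pySetD g (y + U)
              (PySem.List.pySetD (PySem.List.pyGetD g (y + U) []) (x + L)
                (PySem.List.pyGetD (PySem.List.pyGetD puzzle y []) x ""))) g = g := by
        intro g y
        rw [show PySem.List.pyRange 0 N 1 = [] from PySem.List.pyRange_one_eq_nil (by omega),
          List.foldl_nil]
      have hid : ∀ (l : List Int) (g : List (List String)),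
          l.foldl (fun g y =>
            (PySem.List.pyRange 0 N 1).foldl (fun g x =>
              PySem.List.pySetD g (y + U)
                (PySem.List.pySetD (PySem.List.pyGetD g (y + U) []) (x + L)
                  (PySem.List.pyGetD (PySem.List.pyGetD puzzle y []) x ""))) g) g = g := by
        intro l
        induction l with
        | nil => intro g; rfl
        | cons a as ih =>
          intro g
          simp only [List.foldl_cons]
          rw [hbody]
          exact ih _
      exact hid _ _
  rw [hfold, List.map_map]
  simp only [Function.comp_def]
  apply congrArg
  apply List.map_congr_left
  intro y _
  apply congrArg
  apply List.map_congr_left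
  intro x _
  rw [if_neg (by omega : ¬ (U ≤ y ∧ y < U + M ∧ L ≤ x ∧ x < L + N))]

theorem solve_eq_alt (M N U L R D : Int) (puzzle : List (List String))
    (hM : 0 ≤ M) (hN : 0 ≤ N) (hU : 0 ≤ U) (hL : 0 ≤ L) (hR : 0 ≤ R) (hD : 0 ≤ D) :
    solve M N U L R D puzzle = solve_alt M N U L R D puzzle := by
  obtain ⟨m, rfl⟩ : ∃ m : Nat, M = (m : Int) := ⟨M.toNat, (Int.toNat_of_nonneg hM).symm⟩
  obtain ⟨n, rfl⟩ : ∃ n : Nat, N = (n : Int) := ⟨N.toNat, (Int.toNat_of_nonneg hN).symm⟩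
  obtain ⟨u, rfl⟩ : ∃ u : Nat, U = (u : Int) := ⟨U.toNat, (Int.toNat_of_nonneg hU).symm⟩
  obtain ⟨l, rfl⟩ : ∃ l : Nat, L = (l : Int) := ⟨L.toNat, (Int.toNat_of_nonneg hL).symm⟩
  obtain ⟨r, rfl⟩ : ∃ r : Nat, R = (r : Int) := ⟨R.toNat, (Int.toNat_of_nonneg hR).symm⟩
  obtain ⟨d, rfl⟩ : ∃ d : Nat, D = (d : Int) := ⟨D.toNat, (Int.toNat_of_nonneg hD).symm⟩
  simp only [solve, solve_alt]
  simp only [← Nat.cast_add]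
  simp only [PySem.List.pyRange_zero_natCast]
  simp only [List.foldl_map, List.map_map, Function.comp_def]
  simp only [← Nat.cast_add]
  simp only [PySem.List.pySetD_natCast, PySem.List.pyGetD_natCast]
  suffices hg :
      (List.range m).foldl (fun (g : List (List String)) (y : Nat) =>
          (List.range n).foldl (fun g (x : Nat) =>
            g.set (y + u) ((g.getD (y + u) []).set (x + l) ((puzzle.getD y []).getD x ""))) g)
        (List.map (fun (y : Nat) => List.map (fun (x : Nat) =>
            if PySem.Int.mod (((y + x : Nat) : Int)) 2 ≠ 0 then "." else "#")
          (List.range (l + r + n))) (List.range (u + d + m)))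
      = List.map (fun (y : Nat) => List.map (fun (x : Nat) =>
          if ((u : Int) ≤ (y : Int) ∧ (y : Int) < ((u + m : Nat) : Int) ∧
              (l : Int) ≤ (x : Int) ∧ (x : Int) < ((l + n : Nat) : Int)) then
            PySem.List.pyGetD (PySem.List.pyGetD puzzle ((y : Int) - (u : Int)) []) ((x : Int) - (l : Int)) ""
          else if PySem.Int.mod (((y + x : Nat) : Int)) 2 ≠ 0 then "." else "#")
        (List.range (l + r + n))) (List.range (u + d + m)) by
    rw [hg, List.map_map]
    rfl
  apply List.ext_getElem?
  intro j
  have hmg : u + m ≤ (List.map (fun (y : Nat) => List.map (fun (x : Nat) =>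
      if PySem.Int.mod (((y + x : Nat) : Int)) 2 ≠ 0 then "." else "#")
    (List.range (l + r + n))) (List.range (u + d + m))).length := by
    simp only [List.length_map, List.length_range]; omega
  rw [Agrid_getElem? (fun (y x : Nat) => (puzzle.getD y []).getD x "") u l m n _ hmg j]
  conv_rhs => rw [List.getElem?_map]
  by_cases hj : j < u + d + m
  · rw [List.getElem?_range hj, Option.map_some]
    have hjm : (List.map (fun (y : Nat) => List.map (fun (x : Nat) =>
        if PySem.Int.mod (((y + x : Nat) : Int)) 2 ≠ 0 then "." else "#")
      (List.range (l + r + n))) (List.range (u + d + m)))[j]?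
        = some (List.map (fun (x : Nat) =>
            if PySem.Int.mod (((j + x : Nat) : Int)) 2 ≠ 0 then "." else "#")
          (List.range (l + r + n))) := by
      rw [List.getElem?_map, List.getElem?_range hj, Option.map_some]
    have hgd : (List.map (fun (y : Nat) => List.map (fun (x : Nat) =>
        if PySem.Int.mod (((y + x : Nat) : Int)) 2 ≠ 0 then "." else "#")
      (List.range (l + r + n))) (List.range (u + d + m))).getD j []
        = List.map (fun (x : Nat) =>
            if PySem.Int.mod (((j + x : Nat) : Int)) 2 ≠ 0 then "." else "#")
          (List.range (l + r + n)) := by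
      rw [List.getD_eq_getElem?_getD, hjm]; rfl
    rw [hjm, hgd]
    by_cases hwin : u ≤ j ∧ j < u + m
    · rw [if_pos hwin]
      congr 1
      apply List.ext_getElem?
      intro x
      have hwl : l + n ≤ (List.map (fun (x : Nat) =>
          if PySem.Int.mod (((j + x : Nat) : Int)) 2 ≠ 0 then "." else "#")
        (List.range (l + r + n))).length := by
        simp only [List.length_map, List.length_range]; omega
      rw [foldl_set_getElem? "" _ l n _ hwl x]
      conv_rhs => rw [List.getElem?_map]
      by_cases hx : x < l + r + n
      · rw [List.getElem?_range hx, Option.map_some]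
        by_cases hxw : l ≤ x ∧ x < l + n
        · have hc : ((u : Int) ≤ (j : Int) ∧ (j : Int) < ((u + m : Nat) : Int) ∧
              (l : Int) ≤ (x : Int) ∧ (x : Int) < ((l + n : Nat) : Int)) := by
            refine ⟨?_, ?_, ?_, ?_⟩ <;> omega
          rw [if_pos hxw, if_pos hc]
          have e1 : ((j : Int) - (u : Int)) = ((j - u : Nat) : Int) := by omega
          have e2 : ((x : Int) - (l : Int)) = ((x - l : Nat) : Int) := by omega
          rw [e1, e2, PySem.List.pyGetD_natCast, PySem.List.pyGetD_natCast]
        · have hc : ¬ ((u : Int) ≤ (j : Int) ∧ (j : Int) < ((u + m : Nat) : Int) ∧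
              (l : Int) ≤ (x : Int) ∧ (x : Int) < ((l + n : Nat) : Int)) := by omega
          rw [if_neg hxw, if_neg hc, List.getElem?_map, List.getElem?_range hx, Option.map_some]
      · have hxn : (List.range (l + r + n))[x]? = none :=
          List.getElem?_eq_none (by simpa using (by omega : l + r + n ≤ x))
        have hc : ¬ (l ≤ x ∧ x < l + n) := by omega
        rw [if_neg hc, List.getElem?_map, hxn]
        rfl
    · rw [if_neg hwin]
      congr 1
      apply List.map_congr_left
      intro x _
      have hc : ¬ ((u : Int) ≤ (j : Int) ∧ (j : Int) < ((u + m : Nat) : Int) ∧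
          (l : Int) ≤ (x : Int) ∧ (x : Int) < ((l + n : Nat) : Int)) := by omega
      rw [if_neg hc]
  · have hjn : (List.range (u + d + m))[j]? = none :=
      List.getElem?_eq_none (by simpa using (by omega : u + d + m ≤ j))
    rw [hjn, if_neg (by omega : ¬ (u ≤ j ∧ j < u + m)), List.getElem?_map, hjn]
    rfl

-- ===== VERDICT (by name: the statement is the Claim_ definition above) =====
theorem solve_spec : Claim_equal_solve := by
  intro M N U L R D puzzle _ hpre
  by_cases hMN : M ≤ 0 ∨ N ≤ 0
  · exact solve_eq_alt_trivial M N U L R D puzzle hMN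
  · rcases hpre with h | ⟨hU, hL, hR, hD, -, -⟩
    · exact absurd h hMN
    · exact solve_eq_alt M N U L R D puzzle (by omega) (by omega) hU hL hR hD
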